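-- pv_equiv track=rewrite | github.com/jluzhangwei/main | healthcheck/app/web_server.py | parse_check_template_text
-- ===== SOURCE A (Python) =====
-- from typing import Dict, List, Optional, Tuple
--
-- def parse_check_template_text(raw: str) -> Tuple[List[str], List[str]]:
--     text = str(raw or "")
--     lines = text.splitlines()
--     mode = "checks"
--     checks: List[str] = []
--     commands: List[str] = []
--     seen_checks = set()
--     seen_cmds = set()
--     for line in lines:
--         v = line.strip()
--         if not v:
--             continue
--         lower = v.lower()
--         if lower in {"[checks]", "#checks"}:
--             mode = "checks"
--             continue
--         if lower in {"[commands]", "#commands", "[custom_commands]", "#custom_commands"}: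
--             mode = "commands"
--             continue
--         if v.startswith("#"):
--             continue
--         if mode == "commands":
--             if v not in seen_cmds:
--                 seen_cmds.add(v)
--                 commands.append(v)
--         else:
--             if v not in seen_checks:
--                 seen_checks.add(v)
--                 checks.append(v)
--     return checks, commands
-- ===== SOURCE B (Python) =====
-- def parse_check_template_text(raw):
--     text = str(raw or "")
--     headers = {"[checks]": "checks", "#checks": "checks",
--                "[commands]": "commands", "#commands": "commands",
--                "[custom_commands]": "commands", "#custom_commands": "commands"}
--     tagged = []
--     mode = "checks"
--     for line in text.splitlines():
--         v = line.strip()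
--         if not v:
--             continue
--         new_mode = headers.get(v.lower())
--         if new_mode is not None:
--             mode = new_mode
--             continue
--         if not v.startswith("#"):
--             tagged.append((mode, v))
--     checks = list(dict.fromkeys(v for m, v in tagged if m == "checks"))
--     commands = list(dict.fromkeys(v for m, v in tagged if m == "commands"))
--     return checks, commands
-- ===== Notes on version B (the rewrite author's own statement) =====
-- stated objective: alternative
-- what changed: Replaces A's single interleaved loop (mode switching, '#' skip, and per-section seen-set dedup all in one body) by a classification pass that emits a (mode, line) tagged stream via one header lookup table, followed by per-section filtering and dict.fromkeys deduplication as a separate pass.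
import Mathlib
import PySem

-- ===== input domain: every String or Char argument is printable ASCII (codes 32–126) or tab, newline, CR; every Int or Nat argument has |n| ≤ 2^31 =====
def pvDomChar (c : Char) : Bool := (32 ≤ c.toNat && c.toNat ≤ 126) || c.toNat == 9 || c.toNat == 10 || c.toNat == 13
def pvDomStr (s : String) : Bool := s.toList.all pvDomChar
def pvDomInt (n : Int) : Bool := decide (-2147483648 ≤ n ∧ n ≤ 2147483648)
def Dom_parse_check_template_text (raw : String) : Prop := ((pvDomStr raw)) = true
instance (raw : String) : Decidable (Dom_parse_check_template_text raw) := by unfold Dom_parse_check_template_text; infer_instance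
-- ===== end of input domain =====

-- B replaces A's interleaved seen-set loop by a classification pass producing a (mode, line) stream
-- (header lookup in one table), then per-section dedup with dict.fromkeys: alternative decomposition, same cost.

-- ===== PORT A =====
-- loop body of A: state = (mode, checks, commands, seen_checks, seen_cmds)
def pvAStep (st : String × List String × List String × PySem.Set String × PySem.Set String)
    (line : String) : String × List String × List String × PySem.Set String × PySem.Set String :=
  let (mode, checks, commands, seenC, seenK) := st
  let v := PySem.Str.strip line
  if v = "" then st
  else
    let lower := PySem.Str.lower v
    if lower = "[checks]" ∨ lower = "#checks" then ("checks", checks, commands, seenC, seenK)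
    else if lower = "[commands]" ∨ lower = "#commands" ∨ lower = "[custom_commands]" ∨ lower = "#custom_commands" then
      ("commands", checks, commands, seenC, seenK)
    else if PySem.Str.startswith v "#" then st
    else if mode = "commands" then
      if PySem.Set.contains seenK v then st
      else (mode, checks, commands ++ [v], seenC, PySem.Set.add seenK v)
    else
      if PySem.Set.contains seenC v then st
      else (mode, checks ++ [v], commands, PySem.Set.add seenC v, seenK)

def parse_check_template_text (raw : String) : List String × List String :=
  -- text = str(raw or "") equals raw itself for every str argument (if raw = "" then raw or "" is "" = raw)
  let st := (PySem.Str.splitlines raw).foldl pvAStep ("checks", [], [], PySem.Set.empty, PySem.Set.empty)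
  (st.2.1, st.2.2.1)

-- ===== PORT B =====
def pvHeaders : PySem.Dict String String :=
  PySem.Dict.ofList
    [("[checks]", "checks"), ("#checks", "checks"),
     ("[commands]", "commands"), ("#commands", "commands"),
     ("[custom_commands]", "commands"), ("#custom_commands", "commands")]

-- loop body of B: state = (mode, tagged)
def pvBStep (st : String × List (String × String)) (line : String) :
    String × List (String × String) :=
  let (mode, tagged) := st
  let v := PySem.Str.strip line
  if v = "" then st
  else
    match PySem.Dict.get? pvHeaders (PySem.Str.lower v) with
    | some m => (m, tagged)
    | none => if PySem.Str.startswith v "#" then st else (mode, tagged ++ [(mode, v)])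

def parse_check_template_text_alt (raw : String) : List String × List String :=
  let tagged := ((PySem.Str.splitlines raw).foldl pvBStep ("checks", [])).2
  (PySem.List.dedup ((tagged.filter (fun p => p.1 == "checks")).map Prod.snd),
   PySem.List.dedup ((tagged.filter (fun p => p.1 == "commands")).map Prod.snd))

-- ===== PRECONDITION & SPEC =====
def Spec_parse_check_template_text (raw : String) (out : List String × List String) : Prop := out = parse_check_template_text_alt raw
instance (raw : String) (out : List String × List String) : Decidable (Spec_parse_check_template_text raw out) := by unfold Spec_parse_check_template_text; infer_instance

-- ===== CLAIM (what is proved, stated in full; the proofs are below) =====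
def Claim_equal_parse_check_template_text : Prop := ∀ (raw : String), Dom_parse_check_template_text raw → Spec_parse_check_template_text raw (parse_check_template_text raw)

-- ===== LEMMAS AND PROOFS =====
-- the section stream of B's tagged list, restricted to one mode
def pvSect (m : String) (t : List (String × String)) : List String :=
  (t.filter (fun p => p.1 == m)).map Prod.snd

-- one B step only appends to the tagged accumulator, and its new mode ignores it
theorem pvBStep_delta (mode : String) (t : List (String × String)) (line : String) :
    pvBStep (mode, t) line =
      ((pvBStep (mode, []) line).1, t ++ (pvBStep (mode, []) line).2) := by
  simp only [pvBStep]
  by_cases h0 : PySem.Str.strip line = ""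
  · rw [if_pos h0, if_pos h0]; simp
  · rw [if_neg h0, if_neg h0]
    cases hg : PySem.Dict.get? pvHeaders (PySem.Str.lower (PySem.Str.strip line)) with
    | some m => simp
    | none =>
      by_cases hh : PySem.Str.startswith (PySem.Str.strip line) "#" = true
      · rw [if_pos hh, if_pos hh]; simp
      · rw [if_neg hh, if_neg hh]; simp

-- hence B's fold from any accumulator is the fold from [] appended to it
theorem pvB_acc (lines : List String) (mode : String) (t : List (String × String)) :
    lines.foldl pvBStep (mode, t) =
      ((lines.foldl pvBStep (mode, [])).1, t ++ (lines.foldl pvBStep (mode, [])).2) := by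
  induction lines generalizing mode t with
  | nil => simp
  | cons line lines ih =>
    rw [List.foldl_cons, List.foldl_cons, pvBStep_delta mode t line,
        pvBStep_delta mode [] line, ih, ih ((pvBStep (mode, []) line).1) (List.nil ++ _)]
    simp

-- main invariant: A's fold, started with its seen sets equal to its output lists,
-- is B's mode together with per-section Set.update along B's tagged stream
theorem pvMain (lines : List String) (mode : String) (C K : PySem.Set String)
    (hm : mode = "checks" ∨ mode = "commands") :
    lines.foldl pvAStep (mode, C, K, C, K) =
      ((lines.foldl pvBStep (mode, [])).1,
       PySem.Set.update C (pvSect "checks" (lines.foldl pvBStep (mode, [])).2),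
       PySem.Set.update K (pvSect "commands" (lines.foldl pvBStep (mode, [])).2),
       PySem.Set.update C (pvSect "checks" (lines.foldl pvBStep (mode, [])).2),
       PySem.Set.update K (pvSect "commands" (lines.foldl pvBStep (mode, [])).2)) := by
  induction lines generalizing mode C K with
  | nil => simp [pvSect, PySem.Set.update]
  | cons line lines ih =>
    rw [List.foldl_cons, List.foldl_cons]
    simp only [pvAStep, pvBStep]
    by_cases h0 : PySem.Str.strip line = ""
    · rw [if_pos h0, if_pos h0]; exact ih mode C K hm
    · rw [if_neg h0, if_neg h0]
      by_cases h1 : PySem.Str.lower (PySem.Str.strip line) = "[checks]" ∨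
                    PySem.Str.lower (PySem.Str.strip line) = "#checks"
      · have hg : PySem.Dict.get? pvHeaders (PySem.Str.lower (PySem.Str.strip line)) = some "checks" := by
          rcases h1 with h | h <;> rw [h] <;> decide
        rw [if_pos h1, hg]; exact ih "checks" C K (Or.inl rfl)
      · by_cases h2 : PySem.Str.lower (PySem.Str.strip line) = "[commands]" ∨
                      PySem.Str.lower (PySem.Str.strip line) = "#commands" ∨
                      PySem.Str.lower (PySem.Str.strip line) = "[custom_commands]" ∨
                      PySem.Str.lower (PySem.Str.strip line) = "#custom_commands"
        · have hg : PySem.Dict.get? pvHeaders (PySem.Str.lower (PySem.Str.strip line)) = some "commands" := by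
            rcases h2 with h | h | h | h <;> rw [h] <;> decide
          rw [if_neg h1, if_pos h2, hg]; exact ih "commands" C K (Or.inr rfl)
        · have hg : PySem.Dict.get? pvHeaders (PySem.Str.lower (PySem.Str.strip line)) = none := by
            rcases not_or.mp h1 with ⟨a1, a2⟩
            rcases not_or.mp h2 with ⟨b1, hb⟩
            rcases not_or.mp hb with ⟨b2, hc⟩
            rcases not_or.mp hc with ⟨b3, b4⟩
            have hitems : pvHeaders.items =
                [("[checks]", "checks"), ("#checks", "checks"),
                 ("[commands]", "commands"), ("#commands", "commands"),
                 ("[custom_commands]", "commands"), ("#custom_commands", "commands")] := by decide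
            have e1 : ("[checks]" == PySem.Str.lower (PySem.Str.strip line)) = false := beq_eq_false_iff_ne.mpr (Ne.symm a1)
            have e2 : ("#checks" == PySem.Str.lower (PySem.Str.strip line)) = false := beq_eq_false_iff_ne.mpr (Ne.symm a2)
            have e3 : ("[commands]" == PySem.Str.lower (PySem.Str.strip line)) = false := beq_eq_false_iff_ne.mpr (Ne.symm b1)
            have e4 : ("#commands" == PySem.Str.lower (PySem.Str.strip line)) = false := beq_eq_false_iff_ne.mpr (Ne.symm b2)
            have e5 : ("[custom_commands]" == PySem.Str.lower (PySem.Str.strip line)) = false := beq_eq_false_iff_ne.mpr (Ne.symm b3)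
            have e6 : ("#custom_commands" == PySem.Str.lower (PySem.Str.strip line)) = false := beq_eq_false_iff_ne.mpr (Ne.symm b4)
            simp only [PySem.Dict.get?, hitems]
            simp [List.find?, e1, e2, e3, e4, e5, e6]
          rw [if_neg h1, if_neg h2, hg]
          dsimp only
          by_cases hh : PySem.Str.startswith (PySem.Str.strip line) "#" = true
          · rw [if_pos hh, if_pos hh]; exact ih mode C K hm
          · rw [if_neg hh, if_neg hh]
            rcases hm with hmode | hmode <;> subst hmode
            · rw [if_neg (by decide : ¬ ("checks" : String) = "commands")]
              simp only [List.nil_append]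
              rw [pvB_acc lines "checks" [("checks", PySem.Str.strip line)]]
              split_ifs with hc
              · have hmem : PySem.Str.strip line ∈ C := by simpa using hc
                rw [ih "checks" C K (Or.inl rfl)]
                simp [pvSect, PySem.Set.update, PySem.Set.add, hmem]
              · have hmem : PySem.Str.strip line ∉ C := by simpa using hc
                rw [show PySem.Set.add C (PySem.Str.strip line) = C ++ [PySem.Str.strip line] from by
                      simp [PySem.Set.add, hmem],
                    ih "checks" (C ++ [PySem.Str.strip line]) K (Or.inl rfl)]
                simp [pvSect, PySem.Set.update, PySem.Set.add, hmem]
            · rw [if_pos rfl]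
              simp only [List.nil_append]
              rw [pvB_acc lines "commands" [("commands", PySem.Str.strip line)]]
              split_ifs with hc
              · have hmem : PySem.Str.strip line ∈ K := by simpa using hc
                rw [ih "commands" C K (Or.inr rfl)]
                simp [pvSect, PySem.Set.update, PySem.Set.add, hmem]
              · have hmem : PySem.Str.strip line ∉ K := by simpa using hc
                rw [show PySem.Set.add K (PySem.Str.strip line) = K ++ [PySem.Str.strip line] from by
                      simp [PySem.Set.add, hmem],
                    ih "commands" C (K ++ [PySem.Str.strip line]) (Or.inr rfl)]
                simp [pvSect, PySem.Set.update, PySem.Set.add, hmem]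

-- ===== VERDICT (by name: the statement is the Claim_ definition above) =====
theorem parse_check_template_text_spec : Claim_equal_parse_check_template_text := by
  intro raw _
  unfold Spec_parse_check_template_text parse_check_template_text parse_check_template_text_alt
  rw [show (PySem.Set.empty : PySem.Set String) = [] from rfl,
      pvMain (PySem.Str.splitlines raw) "checks" [] [] (Or.inl rfl)]
  simp [pvSect, PySem.Set.update, PySem.List.dedup_eq_ofList, PySem.Set.ofList_eq_foldl]
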